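-- pv_equiv track=rewrite | github.com/rapidcanvasai/rc-reader-pipeline | PRD MTE/MTE Thomson/recipes/product_view.py | extract_base_code
-- ===== SOURCE A (Python) =====
-- def extract_base_code(code: str) -> str:
--     """
--     Remove sufixos conhecidos para obter o código base do produto.
--     Exemplos: R4261AR → R4261, VT443.82BA → VT443.82
--     """
--     KNOWN_SUFFIXES = ['AR', 'BM', 'HM', 'IF', 'IN', 'RD', 'BA', 'AK',
--                       'EF', 'SL', 'SM', 'LM', 'EP', 'PE', 'HJ', 'HK',
--                       'F', 'S', 'H', 'N', 'D']
--
--     code = str(code).strip()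
--
--     # Ordenar por tamanho decrescente (AR antes de A, etc.)
--     for suffix in sorted(KNOWN_SUFFIXES, key=len, reverse=True):
--         if code.endswith(suffix) and len(code) > len(suffix):
--             base = code[:-len(suffix)]
--             # Verificar se base termina com número ou caractere válido (./-)
--             if base and (base[-1].isdigit() or base[-1] in './-'):
--                 return base
--
--     return code
-- ===== SOURCE B (Python) =====
-- def extract_base_code(code: str) -> str:
--     """Scan backward for the last digit/'./-' boundary character, then test
--     whether everything after it is exactly one known suffix."""
--     TWO = {'AR', 'BM', 'HM', 'IF', 'IN', 'RD', 'BA', 'AK',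
--            'EF', 'SL', 'SM', 'LM', 'EP', 'PE', 'HJ', 'HK'}
--     ONE = {'F', 'S', 'H', 'N', 'D'}
--
--     s = str(code).strip()
--
--     i = len(s) - 1
--     while i >= 0 and not (s[i].isdigit() or s[i] in './-'):
--         i -= 1
--     if i >= 0:
--         tail = s[i + 1:]
--         if (len(tail) == 2 and tail in TWO) or (len(tail) == 1 and tail in ONE):
--             return s[:i + 1]
--     return s
-- ===== Notes on version B (the rewrite author's own statement) =====
-- stated objective: alternative
-- what changed: Instead of trying each of the 21 suffixes against the string's end, B scans backward once for the last boundary character (digit or './-') and then tests whether the tail after that boundary is exactly one known suffix of length 1 or 2.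
import Mathlib
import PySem

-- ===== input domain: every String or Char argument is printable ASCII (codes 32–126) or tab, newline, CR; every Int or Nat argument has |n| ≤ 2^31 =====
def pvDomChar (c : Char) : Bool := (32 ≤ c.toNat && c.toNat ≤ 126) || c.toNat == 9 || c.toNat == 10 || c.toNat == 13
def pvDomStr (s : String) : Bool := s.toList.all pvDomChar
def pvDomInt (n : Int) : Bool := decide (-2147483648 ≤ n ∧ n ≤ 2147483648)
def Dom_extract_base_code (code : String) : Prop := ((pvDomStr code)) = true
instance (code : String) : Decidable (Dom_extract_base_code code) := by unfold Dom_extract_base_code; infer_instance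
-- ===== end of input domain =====

-- B replaces A's scan over all 21 sorted suffixes with one backward scan for the
-- last boundary character (digit or './-') followed by a single membership test
-- on the tail after it; objective: alternative algorithm.

-- shared helper: the test 'c.isdigit() or c in "./-"' both sources apply to a character
def pvValidChar (c : Char) : Bool :=
  PySem.Chars.isdigit c || PySem.Chars.isIn [c] ['.', '/', '-']

-- ===== PORT A =====
-- Python's 'base and (base[-1].isdigit() or base[-1] in "./-")'
def pvValidLast (base : List Char) : Bool :=
  match PySem.List.pyGet? base (-1) with
  | some c => pvValidChar c
  | none => false

def pvKnownSuffixes : List String :=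
  ["AR", "BM", "HM", "IF", "IN", "RD", "BA", "AK",
   "EF", "SL", "SM", "LM", "EP", "PE", "HJ", "HK",
   "F", "S", "H", "N", "D"]

-- the 'for suffix in …: if …: return base' loop
def pvLoopA (s : List Char) : List String → List Char
  | [] => s
  | suf :: rest =>
    if PySem.Chars.endswith s suf.toList = true ∧ PySem.Chars.len s > PySem.Chars.len suf.toList then
      let base := PySem.List.slice s none (some (-(PySem.Chars.len suf.toList)))
      if base ≠ [] ∧ pvValidLast base = true then base else pvLoopA s rest
    else pvLoopA s rest

def extract_base_code (code : String) : String :=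
  String.ofList
    (pvLoopA (PySem.Chars.strip code.toList)
      (PySem.List.sorted pvKnownSuffixes (fun t => PySem.Str.len t) true))

-- ===== PORT B =====
def pvTwoSet : PySem.Set (List Char) :=
  PySem.Set.ofList
    [['A','R'], ['B','M'], ['H','M'], ['I','F'], ['I','N'], ['R','D'], ['B','A'], ['A','K'],
     ['E','F'], ['S','L'], ['S','M'], ['L','M'], ['E','P'], ['P','E'], ['H','J'], ['H','K']]

def pvOneSet : PySem.Set (List Char) :=
  PySem.Set.ofList [['F'], ['S'], ['H'], ['N'], ['D']]

-- the 'i = len(s)-1; while i >= 0 and not valid(s[i]): i -= 1' loop, run on fuel i+1;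
-- s.getD n ' ' is exact for Python's s[n] here since every n probed satisfies n < len(s)
def pvDownscan (s : List Char) : Nat → Option Nat
  | 0 => none
  | n + 1 => if pvValidChar (s.getD n ' ') = true then some n else pvDownscan s n

def extract_base_code_alt (code : String) : String :=
  let s := PySem.Chars.strip code.toList
  String.ofList
    (match pvDownscan s s.length with
     | some i =>
       let tail := PySem.List.slice s (some ((i + 1 : Nat) : Int)) none
       if (PySem.Chars.len tail = 2 ∧ tail ∈ pvTwoSet)
           ∨ (PySem.Chars.len tail = 1 ∧ tail ∈ pvOneSet) then
         PySem.List.slice s none (some ((i + 1 : Nat) : Int))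
       else s
     | none => s)

-- ===== PRECONDITION & SPEC =====
def Spec_extract_base_code (code : String) (out : String) : Prop := out = extract_base_code_alt code
instance (code : String) (out : String) : Decidable (Spec_extract_base_code code out) := by unfold Spec_extract_base_code; infer_instance

-- ===== CLAIM (what is proved, stated in full; the proofs are below) =====
def Claim_equal_extract_base_code : Prop := ∀ (code : String), Dom_extract_base_code code → Spec_extract_base_code code (extract_base_code code)

-- ===== LEMMAS AND PROOFS =====

theorem sorted_known :
    PySem.List.sorted pvKnownSuffixes (fun t => PySem.Str.len t) true =
      ["AR", "BM", "HM", "IF", "IN", "RD", "BA", "AK",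
       "EF", "SL", "SM", "LM", "EP", "PE", "HJ", "HK",
       "F", "S", "H", "N", "D"] := by decide

-- the A-loop over a block of suffixes all of length k reduces to one membership test
theorem loop_block (k : Nat) (hk : 0 < k) (l rest : List String) (s : List Char)
    (h : ∀ t ∈ l, t.toList.length = k) :
    pvLoopA s (l ++ rest) =
      if s.length > k ∧ s.drop (s.length - k) ∈ l.map String.toList
          ∧ pvValidLast (s.take (s.length - k)) = true then
        s.take (s.length - k)
      else pvLoopA s rest := by
  induction l with
  | nil => simp
  | cons t tl ih =>
    have ht : t.toList.length = k := h t (by simp)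
    have htl : ∀ u ∈ tl, u.toList.length = k := fun u hu => h u (by simp [hu])
    have hlent : PySem.Chars.len t.toList = (k : Int) := by
      simp [PySem.Chars.len_eq, ht]
    rw [List.cons_append]
    simp only [pvLoopA]
    by_cases hlen : k < s.length
    · have hgt : PySem.Chars.len s > PySem.Chars.len t.toList := by
        rw [hlent, PySem.Chars.len_eq]; exact_mod_cast hlen
      by_cases hdrop : s.drop (s.length - k) = t.toList
      · have hsuf : PySem.Chars.endswith s t.toList = true := by
          rw [PySem.Chars.endswith_iff, List.suffix_iff_eq_drop, ht, hdrop]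
        have hbase : PySem.List.slice s none (some (-(PySem.Chars.len t.toList)))
            = s.take (s.length - k) := by
          rw [hlent, PySem.List.slice_to_neg_natCast s k hk]
        have hne : s.take (s.length - k) ≠ [] := by
          intro hcon
          have h1 := congrArg List.length hcon
          rw [List.length_take, List.length_nil] at h1
          omega
        rw [if_pos ⟨hsuf, hgt⟩]
        simp only [hbase]
        by_cases hv : pvValidLast (s.take (s.length - k)) = true
        · rw [if_pos ⟨hne, hv⟩, if_pos ⟨hlen, by simp [← hdrop], hv⟩]
        · rw [if_neg (by tauto), ih htl, if_neg (by tauto), if_neg (by tauto)]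
      · have hsuf : ¬ PySem.Chars.endswith s t.toList = true := by
          rw [PySem.Chars.endswith_iff, List.suffix_iff_eq_drop, ht]
          exact fun hc => hdrop hc.symm
        rw [if_neg (by tauto), ih htl]
        have hmem : s.drop (s.length - k) ∈ (t :: tl).map String.toList
            ↔ s.drop (s.length - k) ∈ tl.map String.toList := by
          simp [hdrop]
        by_cases hc : s.length > k ∧ s.drop (s.length - k) ∈ tl.map String.toList
            ∧ pvValidLast (s.take (s.length - k)) = true
        · rw [if_pos hc, if_pos ⟨hc.1, hmem.mpr hc.2.1, hc.2.2⟩]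
        · rw [if_neg hc, if_neg (fun hc2 => hc ⟨hc2.1, hmem.mp hc2.2.1, hc2.2.2⟩)]
    · have hnot : ¬ (PySem.Chars.endswith s t.toList = true
          ∧ PySem.Chars.len s > PySem.Chars.len t.toList) := by
        rintro ⟨-, hgt⟩
        rw [hlent, PySem.Chars.len_eq] at hgt
        have : (k:Int) < s.length := hgt
        omega
      rw [if_neg hnot, ih htl, if_neg (by tauto), if_neg (by tauto)]

theorem pvLoopA_nil (s : List Char) : pvLoopA s [] = s := rfl

-- every known suffix consists only of non-boundary characters (uppercase letters)
theorem two_facts : ∀ x ∈ pvTwoSet, x.length = 2 ∧ x.all (fun c => !pvValidChar c) = true := by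
  decide

theorem one_facts : ∀ x ∈ pvOneSet, x.length = 1 ∧ x.all (fun c => !pvValidChar c) = true := by
  decide

-- characterization of the backward scan
theorem downscan_none (s : List Char) (n : Nat) (h : pvDownscan s n = none) :
    ∀ j < n, pvValidChar (s.getD j ' ') = false := by
  induction n with
  | zero => intro j hj; omega
  | succ m ih =>
    intro j hj
    unfold pvDownscan at h
    by_cases hv : pvValidChar (s.getD m ' ') = true
    · rw [if_pos hv] at h; exact absurd h (by simp)
    · rw [if_neg hv] at h
      by_cases hjm : j = m
      · subst hjm; simpa using hv
      · exact ih h j (by omega)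

theorem downscan_some (s : List Char) (n i : Nat) (h : pvDownscan s n = some i) :
    i < n ∧ pvValidChar (s.getD i ' ') = true
      ∧ ∀ j, i < j → j < n → pvValidChar (s.getD j ' ') = false := by
  induction n with
  | zero => exact absurd h (by simp [pvDownscan])
  | succ m ih =>
    unfold pvDownscan at h
    by_cases hv : pvValidChar (s.getD m ' ') = true
    · rw [if_pos hv] at h
      have : i = m := by simpa using h.symm
      subst this
      exact ⟨by omega, hv, fun j h1 h2 => by omega⟩
    · rw [if_neg hv] at h
      obtain ⟨h1, h2, h3⟩ := ih h
      refine ⟨by omega, h2, fun j hj1 hj2 => ?_⟩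
      by_cases hjm : j = m
      · subst hjm; simpa using hv
      · exact h3 j hj1 (by omega)

-- pvValidLast of a nonempty prefix is the boundary test on its last character
theorem validLast_take (s : List Char) (m : Nat) (h0 : 0 < m) (h1 : m ≤ s.length) :
    pvValidLast (s.take m) = pvValidChar (s.getD (m - 1) ' ') := by
  have hlen : (s.take m).length = m := by simp [List.length_take]; omega
  have hget : (s.take m).getLast? = some (s.getD (m - 1) ' ') := by
    rw [List.getLast?_eq_getElem?, hlen, List.getElem?_take_of_lt (by omega),
        List.getD, List.getElem?_eq_getElem (by omega)]
    simp
  unfold pvValidLast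
  rw [PySem.List.pyGet?_neg_one, hget]

-- a getD value at an in-range index past the drop point is a member of the drop
theorem getD_mem_drop (s : List Char) (a j : Nat) (h1 : a ≤ j) (h2 : j < s.length) :
    s.getD j ' ' ∈ s.drop a := by
  have h3 : s.getD j ' ' = s[j] := by
    simp [List.getD, List.getElem?_eq_getElem h2]
  have h4 : s[j] = (s.drop a)[j - a]'(by rw [List.length_drop]; omega) := by
    rw [List.getElem_drop]
    congr 1
    omega
  rw [h3, h4]
  exact List.getElem_mem _

-- the core equivalence: the two-block reduction of A's loop equals B's boundary scan
theorem key (s : List Char) :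
    (if s.length > 2 ∧ s.drop (s.length - 2) ∈ pvTwoSet
        ∧ pvValidLast (s.take (s.length - 2)) = true then s.take (s.length - 2)
     else if s.length > 1 ∧ s.drop (s.length - 1) ∈ pvOneSet
        ∧ pvValidLast (s.take (s.length - 1)) = true then s.take (s.length - 1)
     else s)
    = (match pvDownscan s s.length with
       | some i =>
         let tail := PySem.List.slice s (some ((i + 1 : Nat) : Int)) none
         if (PySem.Chars.len tail = 2 ∧ tail ∈ pvTwoSet)
             ∨ (PySem.Chars.len tail = 1 ∧ tail ∈ pvOneSet) then
           PySem.List.slice s none (some ((i + 1 : Nat) : Int))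
         else s
       | none => s) := by
  cases h : pvDownscan s s.length with
  | none =>
    have inv := downscan_none s s.length h
    have c1 : ¬ (s.length > 2 ∧ s.drop (s.length - 2) ∈ pvTwoSet
        ∧ pvValidLast (s.take (s.length - 2)) = true) := by
      rintro ⟨hl, -, hv⟩
      rw [validLast_take s (s.length - 2) (by omega) (by omega)] at hv
      rw [inv (s.length - 2 - 1) (by omega)] at hv
      exact absurd hv (by simp)
    have c2 : ¬ (s.length > 1 ∧ s.drop (s.length - 1) ∈ pvOneSet
        ∧ pvValidLast (s.take (s.length - 1)) = true) := by
      rintro ⟨hl, -, hv⟩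
      rw [validLast_take s (s.length - 1) (by omega) (by omega)] at hv
      rw [inv (s.length - 1 - 1) (by omega)] at hv
      exact absurd hv (by simp)
    rw [if_neg c1, if_neg c2]
  | some i =>
    obtain ⟨hi, hvi, hmax⟩ := downscan_some s s.length i h
    simp only [PySem.List.slice_from_natCast, PySem.List.slice_to_natCast, PySem.Chars.len_eq,
      List.length_drop]
    have htl : s.length - (i + 1) = s.length - i - 1 := by omega
    by_cases hc : (((s.length - (i + 1) : Nat) : Int) = 2 ∧ s.drop (i + 1) ∈ pvTwoSet)
        ∨ (((s.length - (i + 1) : Nat) : Int) = 1 ∧ s.drop (i + 1) ∈ pvOneSet)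
    · rw [if_pos hc]
      rcases hc with ⟨hlen2, hmem⟩ | ⟨hlen1, hmem⟩
      · -- tail is a 2-char known suffix: i = len - 3, A's first branch fires
        have hieq : i + 1 = s.length - 2 ∧ s.length > 2 := by
          constructor <;> omega
        rw [if_pos ⟨hieq.2, by rw [← hieq.1]; exact hmem, by
          rw [← hieq.1, validLast_take s (i + 1) (by omega) (by omega)]
          simpa using hvi⟩]
        rw [hieq.1]
      · -- tail is a 1-char known suffix: i = len - 2, A's first branch cannot fire
        have hieq : i + 1 = s.length - 1 ∧ s.length > 1 := by
          constructor <;> omega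
        have c1 : ¬ (s.length > 2 ∧ s.drop (s.length - 2) ∈ pvTwoSet
            ∧ pvValidLast (s.take (s.length - 2)) = true) := by
          rintro ⟨hl, hm, -⟩
          have hmemc : s.getD (s.length - 2) ' ' ∈ s.drop (s.length - 2) :=
            getD_mem_drop s (s.length - 2) (s.length - 2) (le_refl _) (by omega)
          have hall := (two_facts _ hm).2
          rw [List.all_eq_true] at hall
          have := hall _ hmemc
          have hieq2 : s.length - 2 = i := by omega
          rw [hieq2, hvi] at this
          exact absurd this (by simp)
        rw [if_neg c1]
        rw [if_pos ⟨hieq.2, by rw [← hieq.1]; exact hmem, by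
          rw [← hieq.1, validLast_take s (i + 1) (by omega) (by omega)]
          simpa using hvi⟩]
        rw [hieq.1]
    · rw [if_neg hc]
      have c1 : ¬ (s.length > 2 ∧ s.drop (s.length - 2) ∈ pvTwoSet
          ∧ pvValidLast (s.take (s.length - 2)) = true) := by
        rintro ⟨hl, hm, hv⟩
        have hall := (two_facts _ hm).2
        rw [List.all_eq_true] at hall
        have hinv2 : pvValidChar (s.getD (s.length - 2) ' ') = false := by
          have := hall _ (getD_mem_drop s (s.length - 2) (s.length - 2) (le_refl _) (by omega))
          simpa using this
        have hinv1 : pvValidChar (s.getD (s.length - 1) ' ') = false := by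
          have := hall _ (getD_mem_drop s (s.length - 2) (s.length - 1) (by omega) (by omega))
          simpa using this
        rw [validLast_take s (s.length - 2) (by omega) (by omega)] at hv
        -- maximality pins i = len - 3
        have hieq : i = s.length - 3 := by
          by_contra hne
          by_cases hlt : i < s.length - 2 - 1
          · rw [hmax (s.length - 2 - 1) hlt (by omega)] at hv
            exact absurd hv (by simp)
          · have : i = s.length - 2 ∨ i = s.length - 1 := by omega
            rcases this with h' | h' <;> (rw [h'] at hvi)
            · rw [hinv2] at hvi; exact absurd hvi (by simp)
            · rw [hinv1] at hvi; exact absurd hvi (by simp)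
        apply hc
        left
        constructor
        · omega
        · rw [show i + 1 = s.length - 2 by omega]; exact hm
      have c2 : ¬ (s.length > 1 ∧ s.drop (s.length - 1) ∈ pvOneSet
          ∧ pvValidLast (s.take (s.length - 1)) = true) := by
        rintro ⟨hl, hm, hv⟩
        have hall := (one_facts _ hm).2
        rw [List.all_eq_true] at hall
        have hinv1 : pvValidChar (s.getD (s.length - 1) ' ') = false := by
          have := hall _ (getD_mem_drop s (s.length - 1) (s.length - 1) (le_refl _) (by omega))
          simpa using this
        rw [validLast_take s (s.length - 1) (by omega) (by omega)] at hv
        have hieq : i = s.length - 2 := by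
          by_contra hne
          by_cases hlt : i < s.length - 1 - 1
          · rw [hmax (s.length - 1 - 1) hlt (by omega)] at hv
            exact absurd hv (by simp)
          · have : i = s.length - 1 := by omega
            rw [this, hinv1] at hvi; exact absurd hvi (by simp)
        apply hc
        right
        constructor
        · omega
        · rw [show i + 1 = s.length - 1 by omega]; exact hm
      rw [if_neg c1, if_neg c2]

-- ===== VERDICT (by name: the statement is the Claim_ definition above) =====
theorem extract_base_code_spec : Claim_equal_extract_base_code := by
  intro code _
  show extract_base_code code = extract_base_code_alt code
  unfold extract_base_code extract_base_code_alt
  rw [sorted_known]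
  set s := PySem.Chars.strip code.toList with hs
  rw [show (["AR", "BM", "HM", "IF", "IN", "RD", "BA", "AK",
       "EF", "SL", "SM", "LM", "EP", "PE", "HJ", "HK",
       "F", "S", "H", "N", "D"] : List String) =
      ["AR", "BM", "HM", "IF", "IN", "RD", "BA", "AK",
       "EF", "SL", "SM", "LM", "EP", "PE", "HJ", "HK"] ++
      (["F", "S", "H", "N", "D"] ++ []) from rfl]
  rw [loop_block 2 (by omega) _ _ s (by decide)]
  rw [loop_block 1 (by omega) _ _ s (by decide)]
  rw [pvLoopA_nil]
  rw [show (["AR", "BM", "HM", "IF", "IN", "RD", "BA", "AK",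
       "EF", "SL", "SM", "LM", "EP", "PE", "HJ", "HK"] : List String).map String.toList
      = pvTwoSet from by decide]
  rw [show (["F", "S", "H", "N", "D"] : List String).map String.toList
      = pvOneSet from by decide]
  rw [key s]
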